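-- pv_equiv track=rewrite | github.com/Sonaion/py-sonaion-analysis | sonaion_analysis/eyetracking/preprocessing_invalid.py | replace_with_prev_invalid
-- ===== SOURCE A (Python) =====
-- def replace_with_prev_invalid(eye_x, eye_y, pupil_diameter, eye_valid):
--     """
--     A Function to remove invalid eye data, careful there is no machanism to synchronise left and right eye afterwards
--
--     :param eye_x:           an indexable datastructure with the x eye coordinates
--     :param eye_y:           an indexable datastructure with the y eye coordinates
--     :param pupil_diameter:  an indexable datastructure with the pupil diameter
--     :param eye_valid:       an indexable datastructure indicating if the eye is valid (1 if yes)
--     :return                 a tuple (eye_x, eye_y, pupil_diameter, eye_valid)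
--     """
--
--     prev_x = None
--     prev_y = None
--     prev_pupil = None
--     for idx, value in enumerate(eye_valid):
--         if value == 1:
--             prev_x = eye_x[idx]
--             prev_y = eye_y[idx]
--             prev_pupil = pupil_diameter[idx]
--             break
--
--     x = []
--     y = []
--     pupil = []
--     valid = []
--
--     for idx, value in enumerate(eye_valid):
--         if value == 1:
--             x.append(eye_x[idx])
--             y.append(eye_y[idx])
--             pupil.append(pupil_diameter[idx])
--             prev_x = eye_x[idx]
--             prev_y = eye_y[idx]
--             prev_pupil = pupil_diameter[idx]
--         else:
--             x.append(prev_x)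
--             y.append(prev_y)
--             pupil.append(prev_pupil)
--         valid.append(1)
--
--     return x, y, pupil, valid
-- ===== SOURCE B (Python) =====
-- def replace_with_prev_invalid(eye_x, eye_y, pupil_diameter, eye_valid):
--     # Two-pass index-table version: build a source-index list first, then gather.
--     first = next((i for i, v in enumerate(eye_valid) if v == 1), None)
--     if first is None:
--         n = len(eye_valid)
--         return [None] * n, [None] * n, [None] * n, [1] * n
--     src = []
--     last = first
--     for i, v in enumerate(eye_valid):
--         if v == 1:
--             last = i
--         src.append(last)
--     x = [eye_x[i] for i in src]
--     y = [eye_y[i] for i in src]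
--     pupil = [pupil_diameter[i] for i in src]
--     valid = [1] * len(eye_valid)
--     return x, y, pupil, valid
-- ===== Notes on version B (the rewrite author's own statement) =====
-- stated objective: alternative
-- what changed: B builds a source-index table in one pass (last-seen valid index, backfilled with the first valid index) and then gathers x/y/pupil by indexing in separate passes, instead of A's single loop carrying three previous-value registers.
-- outside the precondition, e.g. on replace_with_prev_invalid([], [], [], [1]): A raises IndexError, B raises IndexError
import Mathlib
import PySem

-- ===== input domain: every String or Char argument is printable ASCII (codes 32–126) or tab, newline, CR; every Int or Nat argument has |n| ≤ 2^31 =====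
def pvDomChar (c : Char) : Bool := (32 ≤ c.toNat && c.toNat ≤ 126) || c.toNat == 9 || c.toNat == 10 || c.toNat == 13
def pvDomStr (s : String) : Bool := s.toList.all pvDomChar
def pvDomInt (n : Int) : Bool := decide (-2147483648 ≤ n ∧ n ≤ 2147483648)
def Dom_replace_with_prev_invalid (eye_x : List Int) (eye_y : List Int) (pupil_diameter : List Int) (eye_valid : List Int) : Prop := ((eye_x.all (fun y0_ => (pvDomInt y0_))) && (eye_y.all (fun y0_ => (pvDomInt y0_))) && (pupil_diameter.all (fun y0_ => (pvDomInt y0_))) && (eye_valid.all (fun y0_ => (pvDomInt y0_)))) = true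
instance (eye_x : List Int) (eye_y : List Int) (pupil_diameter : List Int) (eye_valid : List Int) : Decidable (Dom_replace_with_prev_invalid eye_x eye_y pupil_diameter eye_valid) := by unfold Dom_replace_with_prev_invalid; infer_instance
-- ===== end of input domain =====

-- B replaces A's single value-carrying loop by an index table built in one pass plus separate
-- gather passes (objective: alternative decomposition, same cost).

-- ===== PORT A =====
-- A's first loop: scan for the first index whose valid flag is 1 (break on hit).
def pvAFirst (eye_valid : List Int) (k : Nat) : Option Nat :=
  match eye_valid with
  | [] => none
  | v :: rest => if v = 1 then some k else pvAFirst rest (k + 1)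

-- A's second loop, as structural recursion over the enumerate state:
-- k is the running index, (px, py, pp) the prev_* registers.
-- eye_x[idx] is PySem.List.pyGet?; `.getD 0` stands for the IndexError Pre_ excludes.
def pvALoop (ex ey pd : List Int) (k : Nat) (vs : List Int) (px py pp : Int) :
    List Int × List Int × List Int × List Int :=
  match vs with
  | [] => ([], [], [], [])
  | v :: rest =>
    if v = 1 then
      let nx := (PySem.List.pyGet? ex (k : Int)).getD 0
      let ny := (PySem.List.pyGet? ey (k : Int)).getD 0
      let np := (PySem.List.pyGet? pd (k : Int)).getD 0
      let r := pvALoop ex ey pd (k + 1) rest nx ny np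
      (nx :: r.1, ny :: r.2.1, np :: r.2.2.1, 1 :: r.2.2.2)
    else
      let r := pvALoop ex ey pd (k + 1) rest px py pp
      (px :: r.1, py :: r.2.1, pp :: r.2.2.1, 1 :: r.2.2.2)

def replace_with_prev_invalid (eye_x : List Int) (eye_y : List Int) (pupil_diameter : List Int) (eye_valid : List Int) : List Int × List Int × List Int × List Int :=
  -- prev_* start as None in Python; Pre_ excludes every input on which a None would be emitted,
  -- so the none branch's (0,0,0) placeholder is never observable inside Pre_.
  let p : Int × Int × Int :=
    match pvAFirst eye_valid 0 with
    | some i => ((PySem.List.pyGet? eye_x (i : Int)).getD 0,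
                 (PySem.List.pyGet? eye_y (i : Int)).getD 0,
                 (PySem.List.pyGet? pupil_diameter (i : Int)).getD 0)
    | none => (0, 0, 0)
  pvALoop eye_x eye_y pupil_diameter 0 eye_valid p.1 p.2.1 p.2.2

-- ===== PORT B =====
-- B's first scan: next((i for i, v in enumerate(eye_valid) if v == 1), None)
def pvBFirst (eye_valid : List Int) (k : Nat) : Option Nat :=
  match eye_valid with
  | [] => none
  | v :: rest => if v = 1 then some k else pvBFirst rest (k + 1)

-- B's index-table pass: last-seen valid index, one entry per sample.
def pvBSrc (vs : List Int) (k last : Nat) : List Nat :=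
  match vs with
  | [] => []
  | v :: rest =>
    let l := if v = 1 then k else last
    l :: pvBSrc rest (k + 1) l

def replace_with_prev_invalid_alt (eye_x : List Int) (eye_y : List Int) (pupil_diameter : List Int) (eye_valid : List Int) : List Int × List Int × List Int × List Int :=
  match pvBFirst eye_valid 0 with
  | none =>
    -- Python B returns ([None]*n, [None]*n, [None]*n, [1]*n) here; None has no Int form and
    -- Pre_ excludes this branch for nonempty eye_valid, so 0 stands in for None.
    (List.replicate eye_valid.length 0, List.replicate eye_valid.length 0,
     List.replicate eye_valid.length 0, List.replicate eye_valid.length 1)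
  | some f =>
    let src := pvBSrc eye_valid 0 f
    (src.map (fun (i : Nat) => (PySem.List.pyGet? eye_x (i : Int)).getD 0),
     src.map (fun (i : Nat) => (PySem.List.pyGet? eye_y (i : Int)).getD 0),
     src.map (fun (i : Nat) => (PySem.List.pyGet? pupil_diameter (i : Int)).getD 0),
     List.replicate eye_valid.length 1)

-- ===== PRECONDITION & SPEC =====
-- Pre_ excludes (a) nonempty eye_valid with no entry equal to 1, where A returns lists of None
-- (not Int values), and (b) a valid index out of range of eye_x/eye_y/pupil_diameter, where A raises IndexError.
def Pre_replace_with_prev_invalid (eye_x : List Int) (eye_y : List Int) (pupil_diameter : List Int) (eye_valid : List Int) : Prop :=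
  (eye_valid = [] ∨ (1 : Int) ∈ eye_valid) ∧
  ∀ i < eye_valid.length, eye_valid.getD i 0 = 1 →
    i < eye_x.length ∧ i < eye_y.length ∧ i < pupil_diameter.length
instance (eye_x : List Int) (eye_y : List Int) (pupil_diameter : List Int) (eye_valid : List Int) : Decidable (Pre_replace_with_prev_invalid eye_x eye_y pupil_diameter eye_valid) := by unfold Pre_replace_with_prev_invalid; infer_instance

def pvWitness_replace_with_prev_invalid : List Int × List Int × List Int × List Int :=
  ([10, 20, 30], [11, 21, 31], [4, 5, 6], [0, 1, 0])

def Spec_replace_with_prev_invalid (eye_x : List Int) (eye_y : List Int) (pupil_diameter : List Int) (eye_valid : List Int) (out : List Int × List Int × List Int × List Int) : Prop := out = replace_with_prev_invalid_alt eye_x eye_y pupil_diameter eye_valid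
instance (eye_x : List Int) (eye_y : List Int) (pupil_diameter : List Int) (eye_valid : List Int) (out : List Int × List Int × List Int × List Int) : Decidable (Spec_replace_with_prev_invalid eye_x eye_y pupil_diameter eye_valid out) := by unfold Spec_replace_with_prev_invalid; infer_instance

-- ===== CLAIM (what is proved, stated in full; the proofs are below) =====
def Claim_equal_replace_with_prev_invalid : Prop := ∀ (eye_x : List Int) (eye_y : List Int) (pupil_diameter : List Int) (eye_valid : List Int), Dom_replace_with_prev_invalid eye_x eye_y pupil_diameter eye_valid → Pre_replace_with_prev_invalid eye_x eye_y pupil_diameter eye_valid → Spec_replace_with_prev_invalid eye_x eye_y pupil_diameter eye_valid (replace_with_prev_invalid eye_x eye_y pupil_diameter eye_valid)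

-- ===== LEMMAS AND PROOFS =====

-- The two first-scan helpers are the same recursion.
theorem pvBFirst_eq_pvAFirst (vs : List Int) (k : Nat) : pvBFirst vs k = pvAFirst vs k := by
  induction vs generalizing k with
  | nil => rfl
  | cons v rest ih => simp [pvBFirst, pvAFirst, ih]

theorem pvAFirst_none (vs : List Int) (k : Nat) (h : pvAFirst vs k = none) : (1 : Int) ∉ vs := by
  induction vs generalizing k with
  | nil => simp
  | cons v rest ih =>
    by_cases hv : v = 1
    · simp [pvAFirst, hv] at h
    · simp [pvAFirst, hv] at h
      simp [ih _ h]
      intro hc; exact hv hc.symm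

-- Main invariant: A's loop with prev registers holding the values at index j equals
-- B's gather of the source table started with last = j.
theorem pvLoop_eq_gather (ex ey pd : List Int) (vs : List Int) (k j : Nat) :
    pvALoop ex ey pd k vs
      ((PySem.List.pyGet? ex (j : Int)).getD 0)
      ((PySem.List.pyGet? ey (j : Int)).getD 0)
      ((PySem.List.pyGet? pd (j : Int)).getD 0)
    = ((pvBSrc vs k j).map (fun (i : Nat) => (PySem.List.pyGet? ex (i : Int)).getD 0),
       (pvBSrc vs k j).map (fun (i : Nat) => (PySem.List.pyGet? ey (i : Int)).getD 0),
       (pvBSrc vs k j).map (fun (i : Nat) => (PySem.List.pyGet? pd (i : Int)).getD 0),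
       List.replicate vs.length 1) := by
  induction vs generalizing k j with
  | nil => rfl
  | cons v rest ih =>
    by_cases hv : v = 1
    · have h := ih (k + 1) k
      simp only [PySem.List.pyGet?_natCast] at h ⊢
      simp [pvALoop, pvBSrc, hv, List.replicate_succ, h]
    · have h := ih (k + 1) j
      simp only [PySem.List.pyGet?_natCast] at h ⊢
      simp [pvALoop, pvBSrc, hv, List.replicate_succ, h]

-- ===== VERDICT (by name: the statement is the Claim_ definition above) =====
theorem replace_with_prev_invalid_spec : Claim_equal_replace_with_prev_invalid := by
  intro ex ey pd vs _ hpre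
  unfold Spec_replace_with_prev_invalid replace_with_prev_invalid replace_with_prev_invalid_alt
  rw [pvBFirst_eq_pvAFirst]
  cases hf : pvAFirst vs 0 with
  | none =>
    have h1 := pvAFirst_none vs 0 hf
    rcases hpre.1 with he | hm
    · subst he; rfl
    · exact absurd hm h1
  | some f => simpa using pvLoop_eq_gather ex ey pd vs 0 f
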